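-- pv_equiv track=rewrite | github.com/pypi-data/pypi-mirror-377 | packages/ia-agent-dotnet/ia_agent_dotnet-0.10.0-py3-none-any.whl/ai/ai_optimizer.py | _clean_formatting
-- ===== SOURCE A (Python) =====
-- def _clean_formatting(response: str) -> str:
--     """Limpiar formato de la respuesta"""
--     # Remover espacios extra
--     lines = [line.rstrip() for line in response.split('\n')]
--
--     # Remover líneas vacías excesivas
--     cleaned_lines = []
--     prev_empty = False
--
--     for line in lines:
--         if line.strip() == "":
--             if not prev_empty:
--                 cleaned_lines.append(line)
--             prev_empty = True
--         else:
--             cleaned_lines.append(line)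
--             prev_empty = False
--
--     return '\n'.join(cleaned_lines)
-- ===== SOURCE B (Python) =====
-- def _clean_formatting(response: str) -> str:
--     """Limpiar formato de la respuesta"""
--     lines = [line.rstrip() for line in response.split('\n')]
--     # Group lines into maximal runs: emit a single '' for each run of blank
--     # lines, and emit nonblank lines verbatim.  Correct because after rstrip
--     # every blank line IS '', so keeping one '' per run equals keeping the
--     # first blank of the run as A does.
--     out = []
--     i = 0
--     n = len(lines)
--     while i < n:
--         if lines[i] == '':
--             # skip the whole blank run, emit one blank line for it
--             while i < n and lines[i] == '':
--                 i += 1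
--             out.append('')
--         else:
--             out.append(lines[i])
--             i += 1
--     return '\n'.join(out)
-- ===== Notes on version B (the rewrite author's own statement) =====
-- stated objective: alternative
-- what changed: Replaces A's per-line prev_empty flag loop by a run-grouping scan (groupby-style): an outer index loop with an inner scan that consumes each maximal run of blank lines and emits a single '' for it, while nonblank lines are emitted verbatim.
import Mathlib
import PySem

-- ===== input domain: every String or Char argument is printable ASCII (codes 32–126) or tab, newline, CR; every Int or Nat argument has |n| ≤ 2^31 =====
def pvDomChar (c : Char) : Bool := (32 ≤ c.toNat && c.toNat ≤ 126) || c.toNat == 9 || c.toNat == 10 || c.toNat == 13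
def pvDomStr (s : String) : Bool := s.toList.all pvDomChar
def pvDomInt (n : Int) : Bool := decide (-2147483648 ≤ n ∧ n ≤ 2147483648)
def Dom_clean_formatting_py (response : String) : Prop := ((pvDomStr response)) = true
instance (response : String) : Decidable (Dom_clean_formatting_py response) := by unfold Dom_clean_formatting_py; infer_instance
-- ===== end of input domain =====

-- B replaces A's per-line prev_empty flag loop by a run-grouping scan that consumes each
-- maximal blank run at once and emits one '' for it (alternative decomposition, same cost).

-- ===== PORT A =====
def clean_formatting_py (response : String) : String :=
  let lines := (PySem.Chars.splitOn response.toList ['\n']).map PySem.Chars.rstrip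
  let res := lines.foldl (fun (st : List (List Char) × Bool) line =>
      if PySem.Chars.strip line == ([] : List Char) then
        (if !st.2 then st.1 ++ [line] else st.1, true)
      else
        (st.1 ++ [line], false))
    ([], false)
  String.ofList (PySem.Chars.join ['\n'] res.1)

-- ===== PORT B =====
-- the outer while-loop of Source B; the inner `while lines[j] == ''` scan is the dropWhile
def pvCollapseRuns : List (List Char) → List (List Char)
  | [] => []
  | l :: rest =>
      if l = ([] : List Char) then
        ([] : List Char) :: pvCollapseRuns (rest.dropWhile (fun x => x == ([] : List Char)))
      else
        l :: pvCollapseRuns rest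
termination_by ls => ls.length
decreasing_by
  · exact Nat.lt_succ_of_le (List.length_dropWhile_le _ _)
  · simp

def clean_formatting_py_alt (response : String) : String :=
  let lines := (PySem.Chars.splitOn response.toList ['\n']).map PySem.Chars.rstrip
  String.ofList (PySem.Chars.join ['\n'] (pvCollapseRuns lines))

-- ===== PRECONDITION & SPEC =====
def Spec_clean_formatting_py (response : String) (out : String) : Prop := out = clean_formatting_py_alt response
instance (response : String) (out : String) : Decidable (Spec_clean_formatting_py response out) := by unfold Spec_clean_formatting_py; infer_instance

-- ===== CLAIM (what is proved, stated in full; the proofs are below) =====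
def Claim_equal_clean_formatting_py : Prop := ∀ (response : String), Dom_clean_formatting_py response → Spec_clean_formatting_py response (clean_formatting_py response)

-- ===== LEMMAS AND PROOFS =====

lemma allspace_of_strip_nil (s : List Char) (h : PySem.Chars.strip s = []) :
    ∀ c ∈ s, PySem.Chars.isspace c = true := by
  intro c hc
  have h' : PySem.Chars.rstrip (PySem.Chars.lstrip s) = [] := h
  have hall : ∀ d ∈ PySem.Chars.lstrip s, PySem.Chars.isspace d = true := by
    intro d hd
    have hnil : (PySem.Chars.lstrip s).reverse.dropWhile PySem.Chars.isspace = [] := by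
      have := congrArg List.reverse h'
      simpa [PySem.Chars.rstrip] using this
    exact (List.dropWhile_eq_nil_iff.mp hnil) d (List.mem_reverse.mpr hd)
  rcases (List.mem_append.mp (by
      rw [List.takeWhile_append_dropWhile (p := PySem.Chars.isspace) (l := s)]; exact hc)) with h1 | h2
  · exact List.mem_takeWhile_imp h1
  · exact hall c h2

lemma strip_rstrip_eq_nil_iff (y : List Char) :
    PySem.Chars.strip (PySem.Chars.rstrip y) = [] ↔ PySem.Chars.rstrip y = [] := by
  constructor
  · intro h
    by_contra hne
    have hrev : (PySem.Chars.rstrip y).reverse = y.reverse.dropWhile PySem.Chars.isspace := by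
      simp [PySem.Chars.rstrip]
    have hne' : y.reverse.dropWhile PySem.Chars.isspace ≠ [] := by
      intro h0
      exact hne (by simpa [h0] using congrArg List.reverse hrev)
    have hhead := List.head_dropWhile_not PySem.Chars.isspace hne'
    have hmem : (y.reverse.dropWhile PySem.Chars.isspace).head hne' ∈ PySem.Chars.rstrip y := by
      rw [← List.mem_reverse, hrev]
      exact List.head_mem hne'
    have := allspace_of_strip_nil _ h _ hmem
    simp [hhead] at this
  · intro h; rw [h]; rfl

-- the combined loop invariant: from prev_empty=false A's loop appends pvCollapseRuns ls,
-- and from prev_empty=true it appends pvCollapseRuns of ls with its leading blanks dropped.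
lemma loop_eq (ls : List (List Char))
    (h : ∀ l ∈ ls, PySem.Chars.strip l = ([] : List Char) ↔ l = []) :
    ∀ acc : List (List Char),
    ((ls.foldl (fun (st : List (List Char) × Bool) line =>
        if PySem.Chars.strip line == ([] : List Char) then
          (if !st.2 then st.1 ++ [line] else st.1, true)
        else
          (st.1 ++ [line], false)) (acc, false)).1
      = acc ++ pvCollapseRuns ls)
    ∧ ((ls.foldl (fun (st : List (List Char) × Bool) line =>
        if PySem.Chars.strip line == ([] : List Char) then
          (if !st.2 then st.1 ++ [line] else st.1, true)
        else
          (st.1 ++ [line], false)) (acc, true)).1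
      = acc ++ pvCollapseRuns (ls.dropWhile (fun x => x == ([] : List Char)))) := by
  induction ls with
  | nil => intro acc; simp [pvCollapseRuns]
  | cons l rest ih =>
    intro acc
    have hl := h l (by simp)
    have hrest : ∀ x ∈ rest, PySem.Chars.strip x = ([] : List Char) ↔ x = [] := by
      intro x hx; exact h x (by simp [hx])
    by_cases hb : l = []
    · subst hb
      have hstrip : PySem.Chars.strip ([] : List Char) = [] := rfl
      constructor
      · simp only [List.foldl_cons, hstrip, beq_self_eq_true, reduceIte, Bool.not_false]
        rw [(ih hrest (acc ++ [[]])).2]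
        simp [pvCollapseRuns]
      · simp only [List.foldl_cons, hstrip, beq_self_eq_true, reduceIte, Bool.not_true,
          Bool.false_eq_true, if_false]
        rw [(ih hrest acc).2]
        simp
    · have hs : ¬ (PySem.Chars.strip l == ([] : List Char)) = true := by
        simp only [beq_iff_eq]
        intro h0; exact hb (hl.mp h0)
      constructor
      · simp only [List.foldl_cons, if_neg hs]
        rw [(ih hrest (acc ++ [l])).1]
        simp [pvCollapseRuns, hb]
      · simp only [List.foldl_cons, if_neg hs]
        rw [(ih hrest (acc ++ [l])).1]
        have hd : (l :: rest).dropWhile (fun x => x == ([] : List Char)) = l :: rest := by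
          simp [hb]
        rw [hd]
        simp [pvCollapseRuns, hb]

-- ===== VERDICT (by name: the statement is the Claim_ definition above) =====
theorem clean_formatting_py_spec : Claim_equal_clean_formatting_py := by
  intro response _
  unfold Spec_clean_formatting_py
  simp only [clean_formatting_py, clean_formatting_py_alt]
  have h : ∀ l ∈ (PySem.Chars.splitOn response.toList ['\n']).map PySem.Chars.rstrip,
      PySem.Chars.strip l = ([] : List Char) ↔ l = [] := by
    intro l hlm
    obtain ⟨y, _, rfl⟩ := List.mem_map.mp hlm
    exact strip_rstrip_eq_nil_iff y
  rw [(loop_eq _ h []).1]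
  simp
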